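-- pv_equiv track=rewrite | github.com/trietdeptrai/ChronicAI | chronic-ai/api/app/routers/doctor.py | _ordered_keys
-- ===== SOURCE A (Python) =====
-- from typing import Any, Optional
--
-- def _ordered_keys(source: dict[str, Any], preferred_keys: list[str]) -> list[str]:
--     seen: set[str] = set()
--     ordered: list[str] = []
--     for key in preferred_keys:
--         if key in source and key not in seen:
--             seen.add(key)
--             ordered.append(key)
--     for key in sorted(source.keys()):
--         if key in seen:
--             continue
--         ordered.append(key)
--     return ordered
-- ===== SOURCE B (Python) =====
-- def _ordered_keys(source, preferred_keys):
--     # One sort with a composite key instead of two passes with a seen-set: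
--     # preferred keys (first-occurrence rank) come first, the rest alphabetically.
--     rank = {}
--     for i, key in enumerate(preferred_keys):
--         rank.setdefault(key, i)
--     n = len(preferred_keys)
--     return sorted(source, key=lambda k: (rank.get(k, n), k))
-- ===== Notes on version B (the rewrite author's own statement) =====
-- stated objective: idiomatic
-- what changed: A's two passes (a preferred-keys loop with a seen-set, then a scan over the sorted keys skipping seen ones) are replaced by a single sorted() call under a composite key (first-occurrence rank of preferred keys, then the key itself), with the rank dict built once by enumerate+setdefault.
import Mathlib
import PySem

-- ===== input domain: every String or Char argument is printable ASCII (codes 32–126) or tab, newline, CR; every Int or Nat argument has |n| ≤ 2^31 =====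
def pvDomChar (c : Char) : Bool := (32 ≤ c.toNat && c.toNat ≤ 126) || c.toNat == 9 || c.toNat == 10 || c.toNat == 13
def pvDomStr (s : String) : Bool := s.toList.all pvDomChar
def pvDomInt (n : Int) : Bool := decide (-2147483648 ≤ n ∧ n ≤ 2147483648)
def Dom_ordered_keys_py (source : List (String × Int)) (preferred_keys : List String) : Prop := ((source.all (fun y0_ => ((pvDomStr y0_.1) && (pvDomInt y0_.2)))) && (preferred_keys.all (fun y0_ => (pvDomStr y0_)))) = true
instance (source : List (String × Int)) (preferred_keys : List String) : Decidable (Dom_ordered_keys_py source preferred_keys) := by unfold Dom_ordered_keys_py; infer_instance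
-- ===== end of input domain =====

-- B replaces A's two partition passes with a seen-set by a single sort under a
-- composite key (first-occurrence preferred rank, then the key itself); same values, no speed claim.

-- ===== PORT A =====
def ordered_keys_py (source : List (String × Int)) (preferred_keys : List String) : List String :=
  -- seen: set[str] = set(); ordered: list[str] = []; first loop over preferred_keys
  let sp := preferred_keys.foldl
    (fun (st : PySem.Set String × List String) key =>
      if ((source.map Prod.fst).contains key && !(PySem.Set.contains st.1 key)) = true then
        (PySem.Set.add st.1 key, st.2 ++ [key])
      else st)
    (PySem.Set.empty, [])
  -- for key in sorted(source.keys()): if key in seen: continue; ordered.append(key)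
  (PySem.List.sorted (PySem.List.dedup (source.map Prod.fst)) (fun k => k) false).foldl
    (fun ordered key => if PySem.Set.contains sp.1 key = true then ordered else ordered ++ [key])
    sp.2

-- ===== PORT B =====
def ordered_keys_py_alt (source : List (String × Int)) (preferred_keys : List String) : List String :=
  -- rank = {}; for i, key in enumerate(preferred_keys): rank.setdefault(key, i)
  let rank : PySem.Dict String Int :=
    (PySem.List.enumerate preferred_keys).foldl (fun d q => d.setdefault q.2 q.1) PySem.Dict.empty
  -- n = len(preferred_keys); return sorted(source, key=lambda k: (rank.get(k, n), k))
  let n : Int := preferred_keys.length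
  PySem.List.sorted2 (PySem.List.dedup (source.map Prod.fst)) (fun k => rank.getD k n) (fun k => k) false

-- ===== PRECONDITION & SPEC =====
def Spec_ordered_keys_py (source : List (String × Int)) (preferred_keys : List String) (out : List String) : Prop := out = ordered_keys_py_alt source preferred_keys
instance (source : List (String × Int)) (preferred_keys : List String) (out : List String) : Decidable (Spec_ordered_keys_py source preferred_keys out) := by unfold Spec_ordered_keys_py; infer_instance

-- ===== CLAIM (what is proved, stated in full; the proofs are below) =====
def Claim_equal_ordered_keys_py : Prop := ∀ (source : List (String × Int)) (preferred_keys : List String), Dom_ordered_keys_py source preferred_keys → Spec_ordered_keys_py source preferred_keys (ordered_keys_py source preferred_keys)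

-- ===== LEMMAS AND PROOFS =====

-- Set.update o l appends the first occurrences of l not already in o.
theorem pv_update_eq (l : List String) : ∀ (o : PySem.Set String),
    PySem.Set.update o l = o ++ (PySem.Set.update [] l).filter (fun y => !o.contains y) := by
  induction l with
  | nil => intro o; simp [PySem.Set.update]
  | cons x t ih =>
    intro o
    simp only [PySem.Set.update, List.foldl_cons] at *
    rw [ih (PySem.Set.add o x), ih (PySem.Set.add [] x)]
    by_cases hc : x ∈ o
    · simp [PySem.Set.add, PySem.Set.contains, hc, List.filter_filter]
      apply List.filter_congr
      intro y _
      by_cases hyx : y = x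
      · subst hyx; simp [hc]
      · simp [hyx]
    · simp [PySem.Set.add, PySem.Set.contains, hc, List.filter_filter]

-- first-occurrence dedup, cons form
theorem pv_ofList_cons (x : String) (t : List String) :
    PySem.Set.ofList (x :: t) = x :: (PySem.Set.ofList t).filter (fun y => y != x) := by
  rw [PySem.Set.ofList_eq_foldl, PySem.Set.ofList_eq_foldl]
  show PySem.Set.update [] (x :: t) = _
  simp only [PySem.Set.update, List.foldl_cons]
  have h1 : PySem.Set.add ([] : PySem.Set String) x = [x] := by simp [PySem.Set.add, PySem.Set.contains]
  rw [h1]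
  rw [show (List.foldl PySem.Set.add [x] t : PySem.Set String) = PySem.Set.update [x] t from rfl,
      pv_update_eq t [x]]
  simp only [PySem.Set.update, List.singleton_append, List.cons.injEq, true_and]
  apply List.filter_congr
  intro y _
  simp [PySem.Set.contains, bne]
  rw [Bool.eq_iff_iff]; simp

-- a dedup list is ordered by first-occurrence index
theorem pv_pairwise_idxOf (m : List String) :
    (PySem.Set.ofList m).Pairwise (fun a b => m.idxOf a < m.idxOf b) := by
  induction m with
  | nil => simp [PySem.Set.ofList]
  | cons x t ih =>
    rw [pv_ofList_cons]
    rw [List.pairwise_cons]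
    constructor
    · intro b hb
      have hbx : b ≠ x := by
        have := (List.mem_filter.mp hb).2; simpa [bne] using this
      rw [List.idxOf_cons_self, List.idxOf_cons_ne _ (by simpa using hbx.symm)]
      omega
    · refine (ih.filter _).imp_of_mem ?_
      intro a b ha hb h
      have hax : a ≠ x := by have := (List.mem_filter.mp ha).2; simpa [bne] using this
      have hbx : b ≠ x := by have := (List.mem_filter.mp hb).2; simpa [bne] using this
      rw [List.idxOf_cons_ne _ (by simpa using hax.symm), List.idxOf_cons_ne _ (by simpa using hbx.symm)]
      omega

-- filtering does not reorder: index order in the filtered list lifts to the original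
theorem pv_idxOf_filter_mono (p : String → Bool) (l : List String) : ∀ (a b : String),
    a ∈ l.filter p → b ∈ l.filter p → (l.filter p).idxOf a < (l.filter p).idxOf b →
    l.idxOf a < l.idxOf b := by
  induction l with
  | nil => simp
  | cons x t ih =>
    intro a b ha hb h
    by_cases hpx : p x = true
    · rw [List.filter_cons_of_pos hpx] at ha hb h
      by_cases hax : a = x
      · subst hax
        have hba : b ≠ a := by
          intro e; subst e; omega
        rw [List.idxOf_cons_self, List.idxOf_cons_ne _ (fun e => hba e.symm)]
        omega
      · have hbx : b ≠ x := by
          intro e; subst e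
          rw [List.idxOf_cons_self] at h
          omega
        rw [List.idxOf_cons_ne _ (fun e => hax e.symm), List.idxOf_cons_ne _ (fun e => hbx e.symm)] at h ⊢
        have ha' : a ∈ t.filter p := by
          rcases List.mem_cons.mp ha with e | m; exact absurd e hax; exact m
        have hb' : b ∈ t.filter p := by
          rcases List.mem_cons.mp hb with e | m; exact absurd e hbx; exact m
        have := ih a b ha' hb' (by omega)
        omega
    · rw [List.filter_cons_of_neg hpx] at ha hb h
      have hax : a ≠ x := by rintro rfl; exact hpx (List.of_mem_filter ha)
      have hbx : b ≠ x := by rintro rfl; exact hpx (List.of_mem_filter hb)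
      rw [List.idxOf_cons_ne _ (fun e => hax e.symm), List.idxOf_cons_ne _ (fun e => hbx e.symm)]
      have := ih a b ha hb h
      omega

-- phase 1 of A: the preferred-keys loop keeps seen = ordered = Set.update of the present keys
theorem pv_phase1 (p : String → Bool) (pk : List String) : ∀ (o : PySem.Set String),
    pk.foldl
      (fun (st : PySem.Set String × List String) key =>
        if (p key && !(PySem.Set.contains st.1 key)) = true then
          (PySem.Set.add st.1 key, st.2 ++ [key])
        else st) (o, o)
    = (PySem.Set.update o (pk.filter p), PySem.Set.update o (pk.filter p)) := by
  induction pk with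
  | nil => intro o; simp [PySem.Set.update]
  | cons x t ih =>
    intro o
    rw [List.foldl_cons]
    by_cases hpx : p x = true
    · by_cases hc : PySem.Set.contains o x = true
      · have hm : x ∈ o := by simpa [PySem.Set.contains] using hc
        rw [List.filter_cons_of_pos hpx]
        rw [show PySem.Set.update o (x :: t.filter p) = PySem.Set.update (PySem.Set.add o x) (t.filter p) from rfl]
        have ha : PySem.Set.add o x = o := by simp [PySem.Set.add, PySem.Set.contains, hm]
        rw [ha]
        simpa [hpx, hc, hm] using ih o
      · have hm : x ∉ o := by simpa [PySem.Set.contains] using hc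
        rw [List.filter_cons_of_pos hpx]
        rw [show PySem.Set.update o (x :: t.filter p) = PySem.Set.update (PySem.Set.add o x) (t.filter p) from rfl]
        have ha : PySem.Set.add o x = o ++ [x] := by simp [PySem.Set.add, PySem.Set.contains, hm]
        rw [ha]
        simpa [hpx, hc, hm] using ih (o ++ [x])
    · rw [List.filter_cons_of_neg hpx]
      simpa [hpx] using ih o

-- the rank dict built by enumerate+setdefault holds each key's first index
theorem pv_rank_get (l : List String) : ∀ (s : Int) (d : PySem.Dict String Int) (k : String),
    ((PySem.List.enumerate l s).foldl (fun d q => d.setdefault q.2 q.1) d).get? k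
      = match d.get? k with
        | some v => some v
        | none => if k ∈ l then some (s + l.idxOf k) else none := by
  induction l with
  | nil =>
    intro s d k
    rw [PySem.List.enumerate_nil]
    simp only [List.foldl_nil, List.not_mem_nil, if_false]
    cases d.get? k <;> rfl
  | cons x t ih =>
    intro s d k
    rw [PySem.List.enumerate_cons, List.foldl_cons]
    rw [ih (s+1) (d.setdefault x s) k]
    by_cases hkx : k = x
    · subst hkx
      rw [PySem.Dict.get?_setdefault_self]
      cases hd : d.get? k
      · simp [List.idxOf_cons_self]
      · simp
    · rw [PySem.Dict.get?_setdefault_of_ne _ _ hkx]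
      cases hd : d.get? k
      · simp only [List.mem_cons, hkx, false_or]
        by_cases hm : k ∈ t
        · simp [hm, List.idxOf_cons_ne _ (fun e => hkx e.symm)]

          ring
        · simp [hm]
      · simp

-- sorted2 with the identity second key = sorted under the lexicographic product key
theorem pv_sorted2_eq_sorted_lex (xs : List String) (k1 : String → Int) :
    PySem.List.sorted2 xs k1 (fun k => k) false
      = PySem.List.sorted xs (fun k => toLex (k1 k, k)) false := by
  have hb : (fun a b : String => decide (k1 a < k1 b) || (!decide (k1 b < k1 a) && decide (a < b)))
      = (fun a b : String => decide (toLex (k1 a, a) < toLex (k1 b, b))) := by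
    funext a b
    rw [Bool.eq_iff_iff]
    simp only [Bool.or_eq_true, Bool.and_eq_true, Bool.not_eq_true', decide_eq_true_eq,
      decide_eq_false_iff_not, Prod.Lex.lt_iff, ofLex_toLex]
    constructor
    · rintro (h | ⟨h2, h3⟩)
      · exact Or.inl h
      · rcases lt_trichotomy (k1 a) (k1 b) with h | h | h
        · exact Or.inl h
        · exact Or.inr ⟨h, h3⟩
        · exact absurd h h2
    · rintro (h | ⟨h2, h3⟩)
      · exact Or.inl h
      · exact Or.inr ⟨by omega, h3⟩
  simp only [PySem.List.sorted2, PySem.List.sorted, Bool.false_eq_true, if_false]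
  rw [hb]

-- A computes head ++ alphabetical rest; B's single lex sort returns the same list.
theorem pv_main (source : List (String × Int)) (pk : List String) :
    ordered_keys_py source pk = ordered_keys_py_alt source pk := by
  unfold ordered_keys_py ordered_keys_py_alt
  have hempty : (PySem.Set.empty : PySem.Set String) = [] := rfl
  rw [hempty]
  rw [show (([] : PySem.Set String), ([] : List String)) = (([] : PySem.Set String), ([] : PySem.Set String)) from rfl]
  rw [pv_phase1 (fun k => (source.map Prod.fst).contains k) pk []]
  set p : String → Bool := fun k => (source.map Prod.fst).contains k with hp
  set ks : List String := source.map Prod.fst with hks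
  set head : PySem.Set String := PySem.Set.update [] (pk.filter p) with hhead
  have hheadOf : head = PySem.Set.ofList (pk.filter p) := by
    rw [PySem.Set.ofList_eq_foldl]; rfl
  set keys : List String := PySem.List.dedup ks with hkeys
  set S : List String := PySem.List.sorted keys (fun k => k) false with hS
  set n : Int := (pk.length : Int) with hn
  -- phase 2
  have hswap : (fun (ordered : List String) key =>
      if PySem.Set.contains head key = true then ordered else ordered ++ [key])
    = (fun (ordered : List String) key =>
      if (!PySem.Set.contains head key) = true then ordered ++ [id key] else ordered) := by
    funext o k
    cases PySem.Set.contains head k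
    · simp
    · simp
  dsimp only
  rw [hswap, PySem.List.foldl_append_if]
  simp only [List.map_id]
  -- rank
  set k1 : String → Int := fun k => if k ∈ pk then ((pk.idxOf k : Int)) else n with hk1
  have hrank : (fun k => (((PySem.List.enumerate pk).foldl (fun d q => d.setdefault q.2 q.1)
        PySem.Dict.empty).getD k n)) = k1 := by
    funext k
    rw [PySem.Dict.getD, pv_rank_get pk 0 PySem.Dict.empty k]
    have he : (PySem.Dict.empty : PySem.Dict String Int).get? k = none := rfl
    rw [he]
    by_cases hm : k ∈ pk <;> simp [hm, hk1]
  rw [hrank, pv_sorted2_eq_sorted_lex]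
  -- main
  refine (PySem.List.sorted_eq_of_perm_of_pairwise_lt keys _ (fun k => toLex (k1 k, k)) ?_ ?_).symm
  · -- permutation
    have hSp : S.Perm keys := PySem.List.sorted_perm _ _ _
    have hnk : keys.Nodup := by
      rw [hkeys, PySem.List.dedup_eq_ofList]; exact PySem.Set.nodup_ofList ks
    have hnS : S.Nodup := (hSp.nodup_iff).mpr hnk
    have hnh : head.Nodup := by rw [hheadOf]; exact PySem.Set.nodup_ofList _
    have hsubhead : ∀ x ∈ head, x ∈ keys := by
      intro x hx
      rw [hheadOf, PySem.Set.mem_ofList] at hx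
      have hpx := List.of_mem_filter hx
      have hxs : x ∈ ks := by simpa [hp] using hpx
      rw [hkeys, PySem.List.dedup_eq_ofList, PySem.Set.mem_ofList]; exact hxs
    have hperm1 : head.Perm (S.filter (fun k => PySem.Set.contains head k)) := by
      apply List.perm_of_nodup_nodup_toFinset_eq hnh (hnS.filter _)
      ext x
      simp only [List.mem_toFinset, List.mem_filter]
      constructor
      · intro hx
        exact ⟨hSp.mem_iff.mpr (hsubhead x hx), by simpa [PySem.Set.contains] using hx⟩
      · rintro ⟨-, hc⟩
        simpa [PySem.Set.contains] using hc
    exact (hperm1.append_right _).trans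
      ((List.filter_append_perm (fun k => PySem.Set.contains head k) S).trans hSp)
  · -- pairwise
    dsimp only
    have hSp : S.Perm keys := PySem.List.sorted_perm _ _ _
    have hmem_ks : ∀ x, x ∈ keys ↔ x ∈ ks := by
      intro x
      rw [hkeys, PySem.List.dedup_eq_ofList, PySem.Set.mem_ofList]
    have hhead_pk : ∀ x ∈ head, x ∈ pk := by
      intro x hx
      rw [hheadOf, PySem.Set.mem_ofList] at hx
      exact List.mem_of_mem_filter hx
    have hT_not_pk : ∀ b ∈ S.filter (fun k => !PySem.Set.contains head k), b ∉ pk := by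
      intro b hb hbpk
      have hbS := List.mem_of_mem_filter hb
      have hbq := List.of_mem_filter hb
      have hbks : b ∈ ks := (hmem_ks b).mp (hSp.mem_iff.mp hbS)
      have hbh : b ∈ head := by
        rw [hheadOf, PySem.Set.mem_ofList]
        exact List.mem_filter.mpr ⟨hbpk, by simpa [hp] using hbks⟩
      simp [PySem.Set.contains, hbh] at hbq
    have hk1_mem : ∀ x ∈ pk, k1 x = (pk.idxOf x : Int) := by
      intro x hx; simp [hk1, hx]
    have hk1_lt : ∀ x ∈ pk, k1 x < n := by
      intro x hx
      rw [hk1_mem x hx, hn]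
      exact_mod_cast List.idxOf_lt_length_of_mem hx
    have hk1_not : ∀ x, x ∉ pk → k1 x = n := by
      intro x hx; simp [hk1, hx]
    rw [List.pairwise_append]
    refine ⟨?_, ?_, ?_⟩
    · -- within head
      have hhp : head.Pairwise (fun a b => pk.idxOf a < pk.idxOf b) := by
        rw [hheadOf]
        refine (pv_pairwise_idxOf (pk.filter p)).imp_of_mem ?_
        intro a b ha hb h
        exact pv_idxOf_filter_mono p pk a b ((PySem.Set.mem_ofList _ _).mp ha)
          ((PySem.Set.mem_ofList _ _).mp hb) h
      refine hhp.imp_of_mem ?_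
      intro a b ha hb h
      rw [Prod.Lex.lt_iff]
      left
      simp only [ofLex_toLex]
      rw [hk1_mem a (hhead_pk a ha), hk1_mem b (hhead_pk b hb)]
      exact_mod_cast h
    · -- within tail
      have hTS : S.Pairwise (fun a b : String => a < b) := by
        rw [hS, hkeys, PySem.List.dedup_eq_ofList]
        exact PySem.List.sorted_ofList_pairwise_lt ks
      refine (hTS.filter _).imp_of_mem ?_
      intro a b ha hb h
      rw [Prod.Lex.lt_iff]
      right
      simp only [ofLex_toLex]
      rw [hk1_not a (hT_not_pk a ha), hk1_not b (hT_not_pk b hb)]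
      exact ⟨rfl, h⟩
    · -- cross
      intro a ha b hb
      rw [Prod.Lex.lt_iff]
      left
      simp only [ofLex_toLex]
      rw [hk1_not b (hT_not_pk b hb)]
      exact hk1_lt a (hhead_pk a ha)

-- ===== VERDICT (by name: the statement is the Claim_ definition above) =====
theorem ordered_keys_py_spec : Claim_equal_ordered_keys_py := by
  intro source preferred_keys _
  unfold Spec_ordered_keys_py
  exact pv_main source preferred_keys
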